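-- pv_equiv track=rewrite | github.com/thom-heinrich/twinr | src/twinr/ops/checks.py | _duplicate_gpio_groups
-- ===== SOURCE A (Python) =====
-- from collections.abc import Callable, Iterable, Mapping, Sequence
--
-- def _duplicate_gpio_groups(gpios: Mapping[str, int]) -> list[str]:
--     by_gpio: dict[int, list[str]] = {}
--     for name, gpio in gpios.items():
--         by_gpio.setdefault(gpio, []).append(name)
--     return [
--         f"{'/'.join(sorted(names))} share GPIO {gpio}"
--         for gpio, names in sorted(by_gpio.items())
--         if len(names) > 1
--     ]
-- ===== SOURCE B (Python) =====
-- def _duplicate_gpio_groups(gpios):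
--     items = list(gpios.items())
--     out = []
--     for gpio in sorted({g for _, g in items}):
--         names = sorted(name for name, g in items if g == gpio)
--         if len(names) > 1:
--             out.append(f"{'/'.join(names)} share GPIO {gpio}")
--     return out
-- ===== Notes on version B (the rewrite author's own statement) =====
-- stated objective: simpler
-- what changed: Replaces the dict-accumulate-then-sort-keys pass with a direct loop over the sorted distinct GPIO values, collecting each group's names by filtering the items, so no intermediate dict is built.
import Mathlib
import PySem

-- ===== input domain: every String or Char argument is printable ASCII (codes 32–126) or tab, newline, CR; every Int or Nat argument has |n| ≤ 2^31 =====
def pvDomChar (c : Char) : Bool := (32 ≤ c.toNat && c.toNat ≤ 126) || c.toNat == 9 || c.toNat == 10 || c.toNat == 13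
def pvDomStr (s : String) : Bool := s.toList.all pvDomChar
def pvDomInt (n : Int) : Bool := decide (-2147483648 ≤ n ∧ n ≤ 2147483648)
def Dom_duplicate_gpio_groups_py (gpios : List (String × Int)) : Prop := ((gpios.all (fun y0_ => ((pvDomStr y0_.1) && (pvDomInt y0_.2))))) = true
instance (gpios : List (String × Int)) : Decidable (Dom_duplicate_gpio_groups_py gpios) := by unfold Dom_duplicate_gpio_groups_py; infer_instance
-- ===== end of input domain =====

-- B loops directly over the sorted distinct GPIO values, filtering the items per GPIO, instead of
-- accumulating a dict keyed by GPIO and sorting its items (objective: simpler, no intermediate dict).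

-- ===== PORT A =====
def duplicate_gpio_groups_py (gpios : List (String × Int)) : List String :=
  let by_gpio : PySem.Dict Int (List String) :=
    gpios.foldl (fun d p => d.modify p.2 [] (fun ns => ns ++ [p.1])) PySem.Dict.empty
  -- sorted(by_gpio.items()): the dict's keys are unique, so sorting the (gpio, names)
  -- tuples is exactly the stable sort by the gpio component (names are never compared).
  ((PySem.List.sorted by_gpio.items (fun kv => kv.1) false).filter
      (fun kv => kv.2.length > 1)).map
    (fun kv => PySem.Str.join "/" (PySem.List.sorted kv.2 (fun s => s) false)
               ++ " share GPIO " ++ PySem.Int.toStr kv.1)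

-- ===== PORT B =====
def duplicate_gpio_groups_py_alt (gpios : List (String × Int)) : List String :=
  (PySem.List.sorted (PySem.Set.ofList (gpios.map (fun p => p.2))) (fun g => g) false).foldl
    (fun out gpio =>
      let names := PySem.List.sorted ((gpios.filter (fun p => p.2 == gpio)).map (fun p => p.1))
                     (fun s => s) false
      if names.length > 1 then
        out ++ [PySem.Str.join "/" names ++ " share GPIO " ++ PySem.Int.toStr gpio]
      else out) []

-- ===== PRECONDITION & SPEC =====
def Spec_duplicate_gpio_groups_py (gpios : List (String × Int)) (out : List String) : Prop := out = duplicate_gpio_groups_py_alt gpios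
instance (gpios : List (String × Int)) (out : List String) : Decidable (Spec_duplicate_gpio_groups_py gpios out) := by unfold Spec_duplicate_gpio_groups_py; infer_instance

-- ===== CLAIM (what is proved, stated in full; the proofs are below) =====
def Claim_equal_duplicate_gpio_groups_py : Prop := ∀ (gpios : List (String × Int)), Dom_duplicate_gpio_groups_py gpios → Spec_duplicate_gpio_groups_py gpios (duplicate_gpio_groups_py gpios)

-- ===== LEMMAS AND PROOFS =====

theorem duplicate_gpio_groups_py_eq_alt (gpios : List (String × Int)) :
    duplicate_gpio_groups_py gpios = duplicate_gpio_groups_py_alt gpios := by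
  have hfold : gpios.foldl (fun d p => d.modify p.2 ([] : List String) (fun ns => ns ++ [p.1]))
        PySem.Dict.empty
      = (gpios.map (fun p => (p.2, p.1))).foldl
          (fun d q => d.modify q.1 ([] : List String) (fun ns => ns ++ [q.2])) PySem.Dict.empty := by
    rw [List.foldl_map]
  have hkeys : (gpios.foldl (fun d p => d.modify p.2 ([] : List String) (fun ns => ns ++ [p.1]))
        PySem.Dict.empty).keys = PySem.Set.ofList (gpios.map (fun p => p.2)) := by
    rw [hfold, PySem.Dict.keys_foldl_modify_key]
    simp [PySem.Set.update_nil_left, List.map_map, Function.comp_def]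
  have hnodup : (gpios.foldl (fun d p => d.modify p.2 ([] : List String) (fun ns => ns ++ [p.1]))
        PySem.Dict.empty).keys.Nodup := by
    rw [hkeys]; exact PySem.Set.nodup_ofList _
  have hgetD : ∀ g : Int,
      (gpios.foldl (fun d p => d.modify p.2 ([] : List String) (fun ns => ns ++ [p.1]))
        PySem.Dict.empty).getD g []
      = (gpios.filter (fun p => p.2 == g)).map (fun p => p.1) := by
    intro g
    rw [hfold, PySem.Dict.getD_foldl_modify_append, List.filter_map, List.map_map]
    simp [Function.comp_def]
  have hitems : (gpios.foldl (fun d p => d.modify p.2 ([] : List String) (fun ns => ns ++ [p.1]))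
        PySem.Dict.empty).items
      = (PySem.Set.ofList (gpios.map (fun p => p.2))).map
          (fun k => (k, (gpios.filter (fun p => p.2 == k)).map (fun p => p.1))) := by
    rw [PySem.Dict.items_eq_map_keys _ hnodup ([] : List String), hkeys]
    exact List.map_congr_left (fun k _ => by rw [hgetD])
  have hsorted : PySem.List.sorted
        (gpios.foldl (fun d p => d.modify p.2 ([] : List String) (fun ns => ns ++ [p.1]))
          PySem.Dict.empty).items (fun kv => kv.1) false
      = (PySem.List.sorted (PySem.Set.ofList (gpios.map (fun p => p.2))) (fun g => g) false).map
          (fun k => (k, (gpios.filter (fun p => p.2 == k)).map (fun p => p.1))) := by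
    apply PySem.List.sorted_eq_of_perm_of_pairwise_lt
    · rw [hitems]
      exact (PySem.List.sorted_perm _ _ _).map _
    · exact (PySem.List.sorted_ofList_pairwise_lt _).map _ (fun a b h => h)
  have hB := PySem.List.foldl_append_if
      (l := PySem.List.sorted (PySem.Set.ofList (gpios.map (fun p => p.2))) (fun g => g) false)
      (acc := ([] : List String))
      (p := fun g : Int => decide
        ((PySem.List.sorted ((gpios.filter (fun p => p.2 == g)).map (fun p => p.1))
          (fun s => s) false).length > 1))
      (f := fun g : Int => PySem.Str.join "/"
          (PySem.List.sorted ((gpios.filter (fun p => p.2 == g)).map (fun p => p.1))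
            (fun s => s) false) ++ " share GPIO " ++ PySem.Int.toStr g)
  simp only [decide_eq_true_eq] at hB
  simp only [duplicate_gpio_groups_py, duplicate_gpio_groups_py_alt]
  rw [hsorted, List.filter_map, List.map_map, hB]
  simp only [List.nil_append, Function.comp_def]
  have hfil : ∀ S : List Int,
      S.filter (fun k => decide (((gpios.filter (fun p => p.2 == k)).map (fun p => p.1)).length > 1))
      = S.filter (fun g => decide ((PySem.List.sorted
          ((gpios.filter (fun p => p.2 == g)).map (fun p => p.1)) (fun s => s) false).length > 1)) := by
    intro S
    apply List.filter_congr
    intro g _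
    rw [PySem.List.length_sorted]
  rw [hfil]

-- ===== VERDICT (by name: the statement is the Claim_ definition above) =====
theorem duplicate_gpio_groups_py_spec : Claim_equal_duplicate_gpio_groups_py := by
  intro gpios _
  exact duplicate_gpio_groups_py_eq_alt gpios
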